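-- pv_equiv track=rewrite | github.com/AdamZhouSE/pythonHomework | Code/CodeRecords/2687/60695/297655.py | func
-- ===== SOURCE A (Python) =====
-- def func(n):
--     flag = True
--     for i in range(len(n)):
--         if i % 2 == 1:
--             if n[i] != '0':
--                 flag = False
--         else:
--             if n[i] != '1':
--                 flag = False
--     return flag
-- ===== SOURCE B (Python) =====
-- def func(n):
--     return n == ("10" * (len(n) // 2 + 1))[:len(n)]
-- ===== Notes on version B (the rewrite author's own statement) =====
-- stated objective: simpler
-- what changed: Instead of A's indexed loop with a per-index parity branch and a flag, B constructs the expected alternating pattern of the same length by string repetition and slicing and returns one string equality; there is no loop, branch or index arithmetic in B, and the repetition and comparison run at C speed.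
import Mathlib
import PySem

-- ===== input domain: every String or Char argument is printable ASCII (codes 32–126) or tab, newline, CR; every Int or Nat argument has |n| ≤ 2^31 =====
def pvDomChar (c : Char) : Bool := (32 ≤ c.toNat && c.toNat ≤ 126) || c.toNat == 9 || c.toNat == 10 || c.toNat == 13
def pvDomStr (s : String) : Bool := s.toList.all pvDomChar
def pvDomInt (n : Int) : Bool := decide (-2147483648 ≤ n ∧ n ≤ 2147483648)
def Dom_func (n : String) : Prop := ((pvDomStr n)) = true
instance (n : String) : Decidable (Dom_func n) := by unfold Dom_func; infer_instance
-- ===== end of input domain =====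

-- B replaces A's indexed loop (parity branch + flag) by building the expected
-- alternating pattern of the same length and one equality test; same behaviour, no speed claim.

-- ===== PORT A =====
-- for i in range(len(n)): if i%2==1: flag stays unless n[i]!='0'; else unless n[i]!='1'
def func (n : String) : Bool :=
  (PySem.List.pyRange 0 (n.toList.length : Int) 1).foldl
    (fun flag i =>
      if PySem.Int.mod i 2 == 1 then
        if PySem.List.pyGetD n.toList i ' ' != '0' then false else flag
      else
        if PySem.List.pyGetD n.toList i ' ' != '1' then false else flag)
    true

-- ===== PORT B =====
-- n == ("10" * (len(n)//2 + 1))[:len(n)]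
-- "10" * m is (List.replicate m "10".toList).flatten; s[:k] with 0 ≤ k is List.take k; string == is list equality
def func_alt (n : String) : Bool :=
  n.toList == ((List.replicate (n.toList.length / 2 + 1) ('1' :: '0' :: [])).flatten.take n.toList.length)

-- ===== PRECONDITION & SPEC =====
def Spec_func (n : String) (out : Bool) : Prop := out = func_alt n
instance (n : String) (out : Bool) : Decidable (Spec_func n out) := by unfold Spec_func; infer_instance

-- ===== CLAIM (what is proved, stated in full; the proofs are below) =====
def Claim_equal_func : Prop := ∀ (n : String), Dom_func n → Spec_func n (func n)

-- ===== LEMMAS AND PROOFS =====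

-- the per-position check A performs at natural index k
def goodN (l : List Char) (k : Nat) : Bool :=
  decide (l.getD k ' ' = (if k % 2 == 1 then '0' else '1'))

-- A's loop body is 'flag && goodN', so the fold is 'all'
lemma foldl_and_all (l : List Char) (r : List Int) (flag : Bool)
    (h : ∀ i ∈ r, 0 ≤ i) :
    r.foldl
      (fun flag i =>
        if PySem.Int.mod i 2 == 1 then
          if PySem.List.pyGetD l i ' ' != '0' then false else flag
        else
          if PySem.List.pyGetD l i ' ' != '1' then false else flag)
      flag
    = (flag && r.all (fun i => goodN l i.toNat)) := by
  induction r generalizing flag with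
  | nil => simp
  | cons i r ih =>
    have hi : 0 ≤ i := h i (by simp)
    have hstep :
        (if PySem.Int.mod i 2 == 1 then
          if PySem.List.pyGetD l i ' ' != '0' then false else flag
        else
          if PySem.List.pyGetD l i ' ' != '1' then false else flag)
        = (flag && goodN l i.toNat) := by
      obtain ⟨k, rfl⟩ := Int.eq_ofNat_of_zero_le hi
      have hmod : PySem.Int.mod (k : Int) 2 = ((k % 2 : Nat) : Int) := by
        exact_mod_cast PySem.Int.mod_natCast k 2
      simp only [goodN, hmod, PySem.List.pyGetD_natCast, Int.toNat_natCast]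
      rcases Nat.mod_two_eq_zero_or_one k with hk | hk
      · by_cases hc : l.getD k ' ' = '1' <;> cases flag <;> simp_all
      · by_cases hc : l.getD k ' ' = '0' <;> cases flag <;> simp_all
    rw [List.foldl_cons, hstep, ih _ (fun j hj => h j (by simp [hj])),
      List.all_cons, Bool.and_assoc]

lemma func_eq_all (n : String) :
    func n = (List.range n.toList.length).all (goodN n.toList) := by
  unfold func
  rw [foldl_and_all _ _ _ (by
    intro i hi
    rw [PySem.List.mem_pyRange_one] at hi
    exact hi.1)]
  rw [PySem.List.pyRange_one]
  simp [List.all_map, Function.comp_def]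

-- the repeated pattern "1010…"
def pat (m : Nat) : List Char := (List.replicate m ('1' :: '0' :: [])).flatten

lemma pat_length (m : Nat) : (pat m).length = 2 * m := by
  induction m with
  | zero => rfl
  | succ m ih =>
    simp only [pat, List.replicate_succ, List.flatten_cons] at *
    simp [ih]; omega

lemma pat_getD (m k : Nat) (hk : k < 2 * m) :
    (pat m).getD k ' ' = (if k % 2 = 1 then '0' else '1') := by
  induction m generalizing k with
  | zero => omega
  | succ m ih =>
    simp only [pat, List.replicate_succ, List.flatten_cons] at *
    match k with
    | 0 => rfl
    | 1 => rfl
    | (k + 2) =>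
      have : (('1' :: '0' :: []) ++ (List.replicate m ('1' :: '0' :: [])).flatten).getD (k + 2) ' '
          = (List.replicate m ('1' :: '0' :: [])).flatten.getD k ' ' := rfl
      rw [this, ih k (by omega)]
      simp [Nat.add_mod_right]

lemma all_iff_eq_take (l : List Char) :
    ((List.range l.length).all (goodN l) = true) ↔
      (l = (pat (l.length / 2 + 1)).take l.length) := by
  set len := l.length with hlen
  have hle : len ≤ 2 * (len / 2 + 1) := by omega
  have hplen : ((pat (len / 2 + 1)).take len).length = len := by
    rw [List.length_take, pat_length]; omega
  rw [List.all_eq_true]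
  constructor
  · intro h
    apply List.ext_getElem (by rw [hplen])
    intro k hk1 hk2
    have hg := h k (by simpa using hk1)
    simp only [goodN, decide_eq_true_eq] at hg
    have h1 : l[k] = l.getD k ' ' := (List.getD_eq_getElem l ' ' hk1).symm
    have h2 : ((pat (len / 2 + 1)).take len)[k] = (pat (len / 2 + 1)).getD k ' ' := by
      rw [List.getElem_take, List.getD_eq_getElem]
    rw [h1, h2, hg, pat_getD _ k (by omega)]
    simp [beq_iff_eq]
  · intro h k hk
    simp only [List.mem_range] at hk
    simp only [goodN, decide_eq_true_eq]
    have h1 : l.getD k ' ' = l[k] := List.getD_eq_getElem l ' ' hk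
    rw [h1]
    have hk2 : k < ((pat (len / 2 + 1)).take len).length := by omega
    have : l[k] = ((pat (len / 2 + 1)).take len)[k] := by
      congr 1
    rw [this, List.getElem_take, ← List.getD_eq_getElem _ ' ', pat_getD _ k (by omega)]
    simp [beq_iff_eq]

-- ===== VERDICT (by name: the statement is the Claim_ definition above) =====
theorem func_spec : Claim_equal_func := by
  intro n _
  unfold Spec_func func_alt
  rw [func_eq_all, Bool.eq_iff_iff, beq_iff_eq]
  exact all_iff_eq_take n.toList
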